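-- pv_equiv track=rewrite | github.com/UrielMangisto/ProgramLanguageStructure | SLS-HW3.py | sortedzip_tail
-- ===== SOURCE A (Python) =====
-- def sortedzip_tail(lists):
--     def helper(sorted_lists, acc):
--         # If all sublists are empty, return the accumulated result
--         if all(not sublist for sublist in sorted_lists):
--             return acc
--
--         # Get the first elements of each non-empty sublist
--         first_elements = [sublist[0] if sublist else None for sublist in sorted_lists]
--
--         # Create new sorted_lists without the first elements
--         new_sorted_lists = [sublist[1:] if sublist else [] for sublist in sorted_lists]
--
--         # Recursive call with updated lists and accumulated result
--         return helper(new_sorted_lists, acc + [tuple(first_elements)])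
--
--     # Sort each sublist first
--     sorted_lists = [sorted(sublist) for sublist in lists]
--
--     # Start the recursion with empty accumulator
--     return helper(sorted_lists, [])
-- ===== SOURCE B (Python) =====
-- def sortedzip_tail(lists):
--     sorted_lists = [sorted(sublist) for sublist in lists]
--     maxlen = max((len(s) for s in sorted_lists), default=0)
--     return [tuple(s[i] if i < len(s) else None for s in sorted_lists)
--             for i in range(maxlen)]
-- ===== Notes on version B (the rewrite author's own statement) =====
-- stated objective: faster
-- what changed: Replaces A's recursive front-peeling, which rebuilds every sublist by slicing at each row, with a single index-driven pass after computing the max length once.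
import Mathlib
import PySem

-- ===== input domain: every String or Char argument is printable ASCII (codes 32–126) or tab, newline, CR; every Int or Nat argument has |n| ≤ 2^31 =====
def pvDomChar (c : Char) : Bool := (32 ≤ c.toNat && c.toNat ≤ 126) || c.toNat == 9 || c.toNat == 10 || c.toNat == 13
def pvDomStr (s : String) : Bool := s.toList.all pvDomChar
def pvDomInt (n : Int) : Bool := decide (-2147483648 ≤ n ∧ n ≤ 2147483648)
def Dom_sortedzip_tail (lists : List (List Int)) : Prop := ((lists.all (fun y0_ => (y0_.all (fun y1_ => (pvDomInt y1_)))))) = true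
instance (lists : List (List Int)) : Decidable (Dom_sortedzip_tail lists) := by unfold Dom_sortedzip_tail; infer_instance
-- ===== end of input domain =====

-- B replaces A's recursive front-peeling with slicing by a single index-driven
-- pass after computing the maximum length once (objective: faster; measured).

-- ===== PORT A =====
-- `sublist[1:] if sublist else []` and `sublist[0] if sublist else None`
def pvTl (s : List Int) : List Int := match s with | [] => [] | _ :: t => t
def pvHd (s : List Int) : Option Int := match s with | [] => none | x :: _ => some x

-- tail-sum lemmas sit above the port because its termination proof cites them
theorem pvSumTailLe (ls : List (List Int)) :
    ((ls.map pvTl).map List.length).sum ≤ (ls.map List.length).sum := by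
  induction ls with
  | nil => simp
  | cons x t ih => cases x <;> simp_all [pvTl] <;> omega

theorem pvSumTailLt (ls : List (List Int))
    (h : ls.all (fun s => s.isEmpty) = false) :
    ((ls.map pvTl).map List.length).sum < (ls.map List.length).sum := by
  induction ls with
  | nil => simp at h
  | cons x t ih =>
    cases x with
    | nil =>
      simp only [List.all_cons, List.isEmpty_nil, Bool.true_and] at h
      simpa [pvTl] using ih h
    | cons a x' =>
      have := pvSumTailLe t
      simp_all [pvTl]
      omega

def pvHelper (ls : List (List Int)) (acc : List (List (Option Int))) :
    List (List (Option Int)) :=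
  if h : ls.all (fun s => s.isEmpty) = true then acc
  else pvHelper (ls.map pvTl) (acc ++ [ls.map pvHd])
termination_by (ls.map List.length).sum
decreasing_by
  have h' := pvSumTailLt ls (by simpa using h)
  simpa using h'

def sortedzip_tail (lists : List (List Int)) : List (List (Option Int)) :=
  pvHelper (lists.map (fun s => PySem.List.sorted s (fun x => x))) []

-- ===== PORT B =====
def sortedzip_tail_alt (lists : List (List Int)) : List (List (Option Int)) :=
  let sl := lists.map (fun s => PySem.List.sorted s (fun x => x))
  let maxlen := PySem.List.maxD (sl.map List.length) (fun x => x) 0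
  (List.range maxlen).map (fun i =>
    sl.map (fun s => if i < s.length then s[i]? else none))

-- ===== PRECONDITION & SPEC =====
def Spec_sortedzip_tail (lists : List (List Int)) (out : List (List (Option Int))) : Prop := out = sortedzip_tail_alt lists
instance (lists : List (List Int)) (out : List (List (Option Int))) : Decidable (Spec_sortedzip_tail lists out) := by unfold Spec_sortedzip_tail; infer_instance

-- ===== CLAIM (what is proved, stated in full; the proofs are below) =====
def Claim_equal_sortedzip_tail : Prop := ∀ (lists : List (List Int)), Dom_sortedzip_tail lists → Spec_sortedzip_tail lists (sortedzip_tail lists)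

-- ===== LEMMAS AND PROOFS =====
-- the maximum A's recursion is governed by, as a foldl
def pvMaxLen (ls : List (List Int)) : Nat := (ls.map List.length).foldl max 0

theorem pvMax?ConsEq (l : List Nat) (a : Nat) :
    PySem.List.max? (a :: l) (fun x => x) = some (l.foldl max a) := by
  induction l generalizing a with
  | nil => rfl
  | cons x t ih =>
    by_cases h : a < x
    · have h1 : PySem.List.max? (a :: x :: t) (fun y => y)
          = PySem.List.max? (x :: t) (fun y => y) := by
        simp [PySem.List.max?, h]
      rw [h1, ih]
      simp [List.foldl_cons, Nat.max_eq_right h.le]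
    · have h1 : PySem.List.max? (a :: x :: t) (fun y => y)
          = PySem.List.max? (a :: t) (fun y => y) := by
        simp [PySem.List.max?, h]
      rw [h1, ih]
      simp [List.foldl_cons, Nat.max_eq_left (by omega : x ≤ a)]

theorem pvMaxDEqFoldl (l : List Nat) :
    PySem.List.maxD l (fun x => x) 0 = l.foldl max 0 := by
  cases l with
  | nil => rfl
  | cons x t =>
    simp [PySem.List.maxD, pvMax?ConsEq]

theorem pvMaxLenZero (ls : List (List Int)) (h : ls.all (fun s => s.isEmpty) = true) :
    pvMaxLen ls = 0 := by
  induction ls with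
  | nil => rfl
  | cons x t ih =>
    simp only [List.all_cons, Bool.and_eq_true] at h
    have hx : x.length = 0 := by simpa [List.isEmpty_iff_length_eq_zero] using h.1
    simpa [pvMaxLen, hx] using ih h.2

theorem pvMaxLenPos (ls : List (List Int)) (h : ls.all (fun s => s.isEmpty) = false) :
    1 ≤ pvMaxLen ls := by
  simp only [List.all_eq_false] at h
  obtain ⟨s, hs, hne⟩ := h
  have h1 : 1 ≤ s.length := by
    cases s with
    | nil => simp at hne
    | cons _ _ => simp
  have hmem : s.length ∈ ls.map List.length := List.mem_map_of_mem hs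
  exact le_trans h1 ((PySem.List.le_foldl_max (ls.map List.length) 0).2 _ hmem)

theorem pvFoldlMaxPred (l : List Nat) (a : Nat) :
    (l.map (fun x => x - 1)).foldl max (a - 1) = (l.foldl max a) - 1 := by
  induction l generalizing a with
  | nil => rfl
  | cons x t ih =>
    simp only [List.map_cons, List.foldl_cons]
    rw [show max (a - 1) (x - 1) = max a x - 1 by omega]
    exact ih (max a x)

theorem pvMaxLenTail (ls : List (List Int)) :
    pvMaxLen (ls.map pvTl) = pvMaxLen ls - 1 := by
  have hlen : (ls.map pvTl).map List.length
      = (ls.map List.length).map (fun x => x - 1) := by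
    simp only [List.map_map]
    apply List.map_congr_left
    intro s _
    cases s <;> simp [pvTl]
  simpa [pvMaxLen, hlen] using pvFoldlMaxPred (ls.map List.length) 0

theorem pvHelperEq (n : Nat) (ls : List (List Int)) (acc : List (List (Option Int)))
    (hn : pvMaxLen ls = n) :
    pvHelper ls acc = acc ++ (List.range n).map (fun i => ls.map (fun s => s[i]?)) := by
  induction n generalizing ls acc with
  | zero =>
    have hall : ls.all (fun s => s.isEmpty) = true := by
      cases hb : ls.all (fun s => s.isEmpty) with
      | true => rfl
      | false => have := pvMaxLenPos ls hb; omega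
    rw [pvHelper]
    simp [hall]
  | succ n ih =>
    have hall : ls.all (fun s => s.isEmpty) = false := by
      cases hb : ls.all (fun s => s.isEmpty) with
      | false => rfl
      | true => have := pvMaxLenZero ls hb; omega
    rw [pvHelper]
    simp only [hall, Bool.false_eq_true, dite_false]
    rw [ih _ _ (by rw [pvMaxLenTail, hn]; omega)]
    rw [List.range_succ_eq_map, List.map_cons, List.map_map]
    have hhead : ls.map pvHd = ls.map (fun s => s[0]?) := by
      apply List.map_congr_left
      intro s _
      cases s <;> rfl
    have hcols : (List.range n).map
        (fun i => (ls.map pvTl).map (fun s => s[i]?))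
        = (List.range n).map ((fun i => ls.map (fun s => s[i]?)) ∘ Nat.succ) := by
      apply List.map_congr_left
      intro i _
      simp only [Function.comp, List.map_map]
      apply List.map_congr_left
      intro s _
      cases s <;> rfl
    rw [hcols, hhead]
    simp [List.append_assoc]

-- ===== VERDICT (by name: the statement is the Claim_ definition above) =====
theorem sortedzip_tail_spec : Claim_equal_sortedzip_tail := by
  intro lists _
  unfold Spec_sortedzip_tail sortedzip_tail sortedzip_tail_alt
  dsimp only
  rw [pvHelperEq (pvMaxLen (lists.map (fun s => PySem.List.sorted s (fun x => x))))
      _ [] rfl, pvMaxDEqFoldl]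
  simp only [List.nil_append]
  show (List.range (pvMaxLen _)).map _ = _
  apply List.map_congr_left
  intro i _
  apply List.map_congr_left
  intro s _
  by_cases h : i < s.length
  · rw [if_pos h]
  · rw [if_neg h]
    exact List.getElem?_eq_none (Nat.le_of_not_lt h)
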